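-- pv_equiv track=rewrite | github.com/theLastShadow0/Networks-Data-Communication-Projects | Project 2/project2.py | NRZI_encoding
-- ===== SOURCE A (Python) =====
-- def NRZI_encoding(binary_seq):
--     binary_seq = list(binary_seq)
--     count = 0
--
--     def skip_bit(count):
--         if count < len(binary_seq) and binary_seq[count] == '1':  #if it starts at 1 increment count and go to while loop
--             count += 1
--             switch_bit(count)
--
--         elif count < len(binary_seq) and binary_seq[count] =='0': #if it starts at 0 increment count and repeat skip_bit function
--             count += 1
--             skip_bit(count)
--
--     def switch_bit(count):
--         while count < len(binary_seq):
--
--             if binary_seq[count] == '0':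
--                 binary_seq[count] = '1'
--
--             elif binary_seq[count] == '1':
--                 binary_seq[count] = '0'
--                 count += 1
--                 skip_bit(count)
--                 break
--
--             count += 1
--
--     skip_bit(count)
--     return "".join(binary_seq)
-- ===== SOURCE B (Python) =====
-- def NRZI_encoding(binary_seq):
--     chars = list(binary_seq)
--     i = 0
--     flip = False
--     n = len(chars)
--     while i < n:
--         c = chars[i]
--         if flip:
--             if c == '0':
--                 chars[i] = '1'
--             elif c == '1':
--                 chars[i] = '0'
--                 flip = False
--             i += 1
--         else:
--             if c == '1':
--                 flip = True
--                 i += 1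
--             elif c == '0':
--                 i += 1
--             else:
--                 break
--     return "".join(chars)
-- ===== Notes on version B (the rewrite author's own statement) =====
-- stated objective: simpler
-- what changed: Replaced A's mutually recursive skip_bit/switch_bit pair (which can blow the recursion limit) by a single iterative pass over the list with an index and a flip-mode boolean flag.
import Mathlib
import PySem

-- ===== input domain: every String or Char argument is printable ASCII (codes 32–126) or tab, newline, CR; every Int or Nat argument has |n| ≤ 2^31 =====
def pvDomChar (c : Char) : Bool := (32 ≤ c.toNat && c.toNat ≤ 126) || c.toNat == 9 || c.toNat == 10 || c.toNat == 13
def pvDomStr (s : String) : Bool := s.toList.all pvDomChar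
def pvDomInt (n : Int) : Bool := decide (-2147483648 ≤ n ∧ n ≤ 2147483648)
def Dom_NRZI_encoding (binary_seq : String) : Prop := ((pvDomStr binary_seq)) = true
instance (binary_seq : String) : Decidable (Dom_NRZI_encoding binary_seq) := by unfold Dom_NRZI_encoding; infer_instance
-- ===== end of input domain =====

-- B replaces A's mutual recursion (skip_bit/switch_bit) by a single iterative pass with a
-- boolean flip-mode flag; same return value (A mutates only its local list copy).

-- ===== PORT A =====
-- A's mutual recursion: skip_bit scans '0's, on '1' hands over to switch_bit's while loop,
-- which flips bits until it turns a '1' into '0' and hands back to skip_bit.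
mutual
def pvSkipBit (l : List Char) (count : Nat) : List Char :=
  if count < l.length ∧ l.getD count ' ' = '1' then
    pvSwitchBit l (count + 1)
  else if count < l.length ∧ l.getD count ' ' = '0' then
    pvSkipBit l (count + 1)
  else l
termination_by l.length - count
decreasing_by all_goals omega

def pvSwitchBit (l : List Char) (count : Nat) : List Char :=
  if _h : count < l.length then
    if l.getD count ' ' = '0' then
      pvSwitchBit (l.set count '1') (count + 1)
    else if l.getD count ' ' = '1' then
      pvSkipBit (l.set count '0') (count + 1)
    else
      pvSwitchBit l (count + 1)
  else l
termination_by l.length - count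
decreasing_by all_goals (try simp only [List.length_set]); all_goals omega
end

def NRZI_encoding (binary_seq : String) : String :=
  String.ofList (pvSkipBit binary_seq.toList 0)

-- ===== PORT B =====
-- B's single loop with a flip-mode flag.
def pvNrziLoop (l : List Char) (i : Nat) (flip : Bool) : List Char :=
  if _h : i < l.length then
    let c := l.getD i ' '
    if flip then
      if c = '0' then pvNrziLoop (l.set i '1') (i + 1) true
      else if c = '1' then pvNrziLoop (l.set i '0') (i + 1) false
      else pvNrziLoop l (i + 1) true
    else
      if c = '1' then pvNrziLoop l (i + 1) true
      else if c = '0' then pvNrziLoop l (i + 1) false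
      else l
  else l
termination_by l.length - i
decreasing_by all_goals (try simp only [List.length_set]); all_goals omega

def NRZI_encoding_alt (binary_seq : String) : String :=
  String.ofList (pvNrziLoop binary_seq.toList 0 false)

-- ===== PRECONDITION & SPEC =====
def Spec_NRZI_encoding (binary_seq : String) (out : String) : Prop := out = NRZI_encoding_alt binary_seq
instance (binary_seq : String) (out : String) : Decidable (Spec_NRZI_encoding binary_seq out) := by unfold Spec_NRZI_encoding; infer_instance

-- ===== CLAIM (what is proved, stated in full; the proofs are below) =====
def Claim_equal_NRZI_encoding : Prop := ∀ (binary_seq : String), Dom_NRZI_encoding binary_seq → Spec_NRZI_encoding binary_seq (NRZI_encoding binary_seq)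

-- ===== LEMMAS AND PROOFS =====

-- The state machines coincide: skip mode is flip = false, switch mode is flip = true.
theorem pv_modes_eq (n : Nat) :
    ∀ (l : List Char) (c : Nat), l.length - c ≤ n →
      pvSkipBit l c = pvNrziLoop l c false ∧ pvSwitchBit l c = pvNrziLoop l c true := by
  induction n with
  | zero =>
    intro l c h
    have hc : ¬ c < l.length := by omega
    constructor
    · rw [pvSkipBit.eq_def, pvNrziLoop]; simp [hc]
    · rw [pvSwitchBit.eq_def, pvNrziLoop]; simp [hc]
  | succ n ih =>
    intro l c h
    by_cases hc : c < l.length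
    · have hg : l.getD c ' ' = l[c] := List.getD_eq_getElem l ' ' hc
      constructor
      · rw [pvSkipBit.eq_def, pvNrziLoop]
        by_cases h1 : l[c] = '1'
        · have := (ih l (c + 1) (by omega)).2
          simp [hc, h1, this]
        · by_cases h0 : l[c] = '0'
          · have := (ih l (c + 1) (by omega)).1
            simp [hc, h0, this]
          · simp [hc, h0, h1]
      · rw [pvSwitchBit.eq_def, pvNrziLoop]
        by_cases h0 : l[c] = '0'
        · have := (ih (l.set c '1') (c + 1) (by simp; omega)).2
          simp [hc, h0, this]
        · by_cases h1 : l[c] = '1'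
          · have := (ih (l.set c '0') (c + 1) (by simp; omega)).1
            simp [hc, h1, this]
          · have := (ih l (c + 1) (by omega)).2
            simp [hc, h0, h1, this]
    · constructor
      · rw [pvSkipBit.eq_def, pvNrziLoop]; simp [hc]
      · rw [pvSwitchBit.eq_def, pvNrziLoop]; simp [hc]

-- ===== VERDICT (by name: the statement is the Claim_ definition above) =====
theorem NRZI_encoding_spec : Claim_equal_NRZI_encoding := by
  intro s _
  unfold Spec_NRZI_encoding NRZI_encoding NRZI_encoding_alt
  exact congrArg String.ofList (pv_modes_eq s.toList.length s.toList 0 (by omega)).1
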